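-- pv_equiv track=rewrite | github.com/HKosten/CSE-Capstone---ASU---Machine-Learning-Enhanced-Quantum-State-Inference-for-Generative-Modeling | Hederik Kosten/mmd.py | spectrum_kernel
-- ===== SOURCE A (Python) =====
-- def get_bigrams(sample):
--     bigrams = {}
--     for i in range(len(sample) - 1):
--         pair = (sample[i], sample[i+1])
--         if pair in bigrams:
--             bigrams[pair] += 1
--         else:
--             bigrams[pair] = 1
--     return bigrams
--
-- def spectrum_kernel(s1, s2):
--     bigrams1 = get_bigrams(s1)
--     bigrams2 = get_bigrams(s2)
--
--     dot_product = 0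
--     for pair in bigrams1:
--         if pair in bigrams2:
--             dot_product += bigrams1[pair] * bigrams2[pair]
--     return dot_product
-- ===== SOURCE B (Python) =====
-- def spectrum_kernel(s1, s2):
--     # Count bigrams of s1 only, then stream over s2's adjacent pairs,
--     # adding s1's count for each occurrence.  Same weighted sum, one table.
--     bigrams1 = {}
--     for i in range(len(s1) - 1):
--         pair = (s1[i], s1[i+1])
--         bigrams1[pair] = bigrams1.get(pair, 0) + 1
--     dot_product = 0
--     for i in range(len(s2) - 1):
--         dot_product += bigrams1.get((s2[i], s2[i+1]), 0)
--     return dot_product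
-- ===== Notes on version B (the rewrite author's own statement) =====
-- stated objective: simpler
-- what changed: B builds a bigram-count table for s1 only and streams over s2's adjacent pairs accumulating table lookups, instead of building two tables and intersecting key sets with per-key products.
import Mathlib
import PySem

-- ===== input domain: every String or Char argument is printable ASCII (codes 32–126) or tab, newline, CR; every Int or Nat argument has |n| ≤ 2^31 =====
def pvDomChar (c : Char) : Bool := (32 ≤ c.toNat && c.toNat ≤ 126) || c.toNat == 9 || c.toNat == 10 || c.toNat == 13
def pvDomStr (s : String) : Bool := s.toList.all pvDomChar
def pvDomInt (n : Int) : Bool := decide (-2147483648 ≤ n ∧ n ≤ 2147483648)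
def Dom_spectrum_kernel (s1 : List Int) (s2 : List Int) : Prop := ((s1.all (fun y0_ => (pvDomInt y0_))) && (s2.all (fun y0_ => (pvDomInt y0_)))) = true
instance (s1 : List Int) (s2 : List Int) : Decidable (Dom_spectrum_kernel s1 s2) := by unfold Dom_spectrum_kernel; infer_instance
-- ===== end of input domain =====

-- B (simpler decomposition): one bigram-count table for s1 plus a streaming pass over
-- s2's adjacent pairs, instead of A's two tables intersected key by key.

-- ===== PORT A =====
-- sample[i] / sample[i+1] are ported with pyGetD (default never used: i ranges over
-- 0 .. len-2, so both indices are always in range — exact).  Python's local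
-- 'pair = (…)' is written out inline at each use.
def get_bigramsA (sample : List Int) : PySem.Dict (Int × Int) Int :=
  (PySem.List.pyRange 0 (PySem.List.len sample - 1)).foldl
    (fun d i =>
      if d.contains (PySem.List.pyGetD sample i 0, PySem.List.pyGetD sample (i + 1) 0) then
        d.insert (PySem.List.pyGetD sample i 0, PySem.List.pyGetD sample (i + 1) 0)
          (d.getD (PySem.List.pyGetD sample i 0, PySem.List.pyGetD sample (i + 1) 0) 0 + 1)
      else
        d.insert (PySem.List.pyGetD sample i 0, PySem.List.pyGetD sample (i + 1) 0) 1)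
    PySem.Dict.empty

def spectrum_kernel (s1 : List Int) (s2 : List Int) : Int :=
  (get_bigramsA s1).keys.foldl
    (fun acc pair =>
      if (get_bigramsA s2).contains pair then
        acc + (get_bigramsA s1).getD pair 0 * (get_bigramsA s2).getD pair 0
      else acc)
    0

-- ===== PORT B =====
def spectrum_kernel_alt (s1 : List Int) (s2 : List Int) : Int :=
  (PySem.List.pyRange 0 (PySem.List.len s2 - 1)).foldl
    (fun acc i =>
      acc +
        ((PySem.List.pyRange 0 (PySem.List.len s1 - 1)).foldl
          (fun d j =>
            d.insert (PySem.List.pyGetD s1 j 0, PySem.List.pyGetD s1 (j + 1) 0)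
              (d.getD (PySem.List.pyGetD s1 j 0, PySem.List.pyGetD s1 (j + 1) 0) 0 + 1))
          (PySem.Dict.empty : PySem.Dict (Int × Int) Int)).getD
          (PySem.List.pyGetD s2 i 0, PySem.List.pyGetD s2 (i + 1) 0) 0)
    0

-- ===== PRECONDITION & SPEC =====
def Spec_spectrum_kernel (s1 : List Int) (s2 : List Int) (out : Int) : Prop := out = spectrum_kernel_alt s1 s2
instance (s1 : List Int) (s2 : List Int) (out : Int) : Decidable (Spec_spectrum_kernel s1 s2 out) := by unfold Spec_spectrum_kernel; infer_instance

-- ===== CLAIM (what is proved, stated in full; the proofs are below) =====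
def Claim_equal_spectrum_kernel : Prop := ∀ (s1 : List Int) (s2 : List Int), Dom_spectrum_kernel s1 s2 → Spec_spectrum_kernel s1 s2 (spectrum_kernel s1 s2)

-- ===== LEMMAS AND PROOFS =====

-- The bigram list: adjacent pairs of xs, front to back.
def bg (xs : List Int) : List (Int × Int) := xs.zip xs.tail

lemma bg_length (xs : List Int) : (bg xs).length = xs.length - 1 := by
  simp [bg, List.length_zip]

-- Any index loop over 0 .. len xs - 2 that consumes the pair (xs[i], xs[i+1])
-- is a fold over the bigram list.
lemma foldl_pyRange_pairs {β : Type} (xs : List Int) (f : β → (Int × Int) → β) (init : β)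
    (g : β → Int → β)
    (hg : ∀ acc i, g acc i = f acc (PySem.List.pyGetD xs i 0, PySem.List.pyGetD xs (i + 1) 0)) :
    (PySem.List.pyRange 0 (PySem.List.len xs - 1)).foldl g init = (bg xs).foldl f init := by
  rw [PySem.List.foldl_congr_mem _ g
    (fun acc i => f acc (PySem.List.pyGetD xs i 0, PySem.List.pyGetD xs (i + 1) 0)) init
    (fun acc x _ => hg acc x)]
  have hlen : PySem.List.len xs - 1 = PySem.List.len (bg xs) ∨ xs = [] := by
    cases xs with
    | nil => right; rfl
    | cons a t =>
      left
      simp [PySem.List.len, bg_length]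
  rcases hlen with h | h
  · rw [h]
    have hcongr :
        (PySem.List.pyRange 0 (PySem.List.len (bg xs))).foldl
          (fun acc i => f acc (PySem.List.pyGetD xs i 0, PySem.List.pyGetD xs (i + 1) 0)) init
        = (PySem.List.pyRange 0 (PySem.List.len (bg xs))).foldl
          (fun acc i => f acc (PySem.List.pyGetD (bg xs) i (0, 0))) init := by
      apply PySem.List.foldl_congr_mem
      intro acc i hi
      rw [PySem.List.mem_pyRange_one] at hi
      obtain ⟨h0, hlt⟩ := hi
      obtain ⟨k, rfl⟩ := Int.eq_ofNat_of_zero_le h0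
      have hk : k < (bg xs).length := by
        simp only [PySem.List.len] at hlt
        exact_mod_cast hlt
      have hk1 : k + 1 < xs.length := by
        have := bg_length xs
        omega
      have h1 : ((k : Int) + 1) = ((k + 1 : Nat) : Int) := by push_cast; ring
      rw [h1, PySem.List.pyGetD_natCast, PySem.List.pyGetD_natCast, PySem.List.pyGetD_natCast]
      congr 1
      rw [List.getD_eq_getElem _ _ hk, List.getD_eq_getElem _ _ (by omega),
          List.getD_eq_getElem _ _ hk1]
      simp [bg, List.getElem_zip, List.getElem_tail]
    rw [hcongr, PySem.List.foldl_pyRange_pyGetD (bg xs) (0, 0) f init (by norm_num)]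
    simp
  · subst h
    simp [bg, PySem.List.len, PySem.List.pyRange]

-- A's dict-building loop is the standard counter of the bigram list.
lemma get_bigramsA_eq_counter (xs : List Int) :
    get_bigramsA xs = PySem.Dict.counter (bg xs) := by
  unfold get_bigramsA
  rw [foldl_pyRange_pairs xs
    (fun d pair => if d.contains pair then d.insert pair (d.getD pair 0 + 1) else d.insert pair 1)
    PySem.Dict.empty
    (fun d i =>
      if d.contains (PySem.List.pyGetD xs i 0, PySem.List.pyGetD xs (i + 1) 0) then
        d.insert (PySem.List.pyGetD xs i 0, PySem.List.pyGetD xs (i + 1) 0)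
          (d.getD (PySem.List.pyGetD xs i 0, PySem.List.pyGetD xs (i + 1) 0) 0 + 1)
      else
        d.insert (PySem.List.pyGetD xs i 0, PySem.List.pyGetD xs (i + 1) 0) 1)
    (fun acc i => rfl)]
  rw [← PySem.Dict.foldl_insert_getD_add_one_eq_counter]
  apply PySem.List.foldl_congr_mem
  intro d p _
  by_cases h : d.contains p = true
  · simp [h]
  · have h' : d.contains p = false := by simpa using h
    rw [if_neg (by simp [h']), PySem.Dict.getD_of_not_contains d 0 h']
    norm_num

-- `Finset.sum_list_map_count` states its counts with the `BEq` derived from `DecidableEq`;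
-- bridge it to the standard product `BEq` instance (both are lawful, so the counts agree).
lemma count_beq_eq (p : Int × Int) (l : List (Int × Int)) :
    @List.count _ instBEqOfDecidableEq p l = List.count p l := by
  induction l with
  | nil => rfl
  | cons b t ih => simp [List.count_cons, beq_iff_eq, ih]

-- The purely combinatorial heart: intersect-and-multiply over the distinct bigrams of
-- l1 equals streaming l2's bigrams through l1's counts.
lemma sum_counts_eq (l1 l2 : List (Int × Int)) :
    ((PySem.Set.ofList l1 : List (Int × Int)).map
      (fun p => if l2.contains p then ((l1.count p : Int) * (l2.count p : Int)) else 0)).sum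
    = (l2.map (fun p => (l1.count p : Int))).sum := by
  have hnd := PySem.Set.nodup_ofList l1
  rw [← List.sum_toFinset _ hnd]
  rw [Finset.sum_list_map_count l2 (fun p => (l1.count p : Int))]
  have hset : (PySem.Set.ofList l1 : List (Int × Int)).toFinset = l1.toFinset := by
    apply Finset.ext
    intro p
    simp [List.mem_toFinset, PySem.Set.mem_ofList]
  rw [hset]
  have h1 : ∀ p ∈ l1.toFinset,
      (if l2.contains p then ((l1.count p : Int) * (l2.count p : Int)) else 0)
      = (l1.count p : Int) * (l2.count p : Int) := by
    intro p _
    split_ifs with h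
    · rfl
    · have hp : p ∉ l2 := by simpa using h
      simp [List.count_eq_zero_of_not_mem hp]
  rw [Finset.sum_congr rfl h1]
  refine Eq.trans (b := ∑ p ∈ l2.toFinset, (l1.count p : Int) * (l2.count p : Int)) ?_
    (Finset.sum_congr rfl fun p _ => ?_)
  · calc ∑ p ∈ l1.toFinset, (l1.count p : Int) * (l2.count p : Int)
        = ∑ p ∈ l1.toFinset ∪ l2.toFinset, (l1.count p : Int) * (l2.count p : Int) := by
          refine (Finset.sum_union_eq_left ?_).symm
          intro p _ hp
          have : p ∉ l1 := by simpa using hp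
          simp [List.count_eq_zero_of_not_mem this]
      _ = ∑ p ∈ l2.toFinset, (l1.count p : Int) * (l2.count p : Int) := by
          refine Finset.sum_union_eq_right ?_
          intro p _ hp
          have : p ∉ l2 := by simpa using hp
          simp [List.count_eq_zero_of_not_mem this]
  · rw [nsmul_eq_mul, count_beq_eq]
    exact mul_comm ((List.count p l1 : Int)) ((List.count p l2 : Int))

-- ===== VERDICT (by name: the statement is the Claim_ definition above) =====
theorem spectrum_kernel_spec : Claim_equal_spectrum_kernel := by
  intro s1 s2 _
  unfold Spec_spectrum_kernel spectrum_kernel spectrum_kernel_alt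
  rw [foldl_pyRange_pairs s1
    (fun d pair => d.insert pair (d.getD pair 0 + 1)) PySem.Dict.empty
    (fun d j =>
      d.insert (PySem.List.pyGetD s1 j 0, PySem.List.pyGetD s1 (j + 1) 0)
        (d.getD (PySem.List.pyGetD s1 j 0, PySem.List.pyGetD s1 (j + 1) 0) 0 + 1))
    (fun acc i => rfl)]
  rw [PySem.Dict.foldl_insert_getD_add_one_eq_counter (bg s1)]
  rw [foldl_pyRange_pairs s2
    (fun acc pair => acc + (PySem.Dict.counter (bg s1)).getD pair 0) 0
    (fun acc i =>
      acc + (PySem.Dict.counter (bg s1)).getD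
        (PySem.List.pyGetD s2 i 0, PySem.List.pyGetD s2 (i + 1) 0) 0)
    (fun acc i => rfl)]
  rw [get_bigramsA_eq_counter s1, get_bigramsA_eq_counter s2]
  rw [PySem.Dict.keys_counter]
  have hA :
      (PySem.Set.ofList (bg s1) : List (Int × Int)).foldl
        (fun acc pair =>
          if (PySem.Dict.counter (bg s2)).contains pair then
            acc + (PySem.Dict.counter (bg s1)).getD pair 0 * (PySem.Dict.counter (bg s2)).getD pair 0
          else acc) 0
      = ((PySem.Set.ofList (bg s1) : List (Int × Int)).map
          (fun p => if (bg s2).contains p then ((bg s1).count p : Int) * ((bg s2).count p : Int) else 0)).sum := by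
    rw [PySem.List.foldl_congr_mem _ _
      (fun acc p => acc + if (bg s2).contains p then ((bg s1).count p : Int) * ((bg s2).count p : Int) else 0) 0
      (by
        intro acc p _
        rw [PySem.Dict.contains_counter, PySem.Dict.getD_counter, PySem.Dict.getD_counter]
        by_cases hm : p ∈ bg s2 <;> simp [hm])]
    rw [PySem.List.foldl_add]
    ring
  have hB :
      (bg s2).foldl (fun acc pair => acc + (PySem.Dict.counter (bg s1)).getD pair 0) 0
      = ((bg s2).map (fun p => ((bg s1).count p : Int))).sum := by
    rw [PySem.List.foldl_congr_mem _ _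
      (fun acc p => acc + ((bg s1).count p : Int)) 0
      (by intro acc p _; rw [PySem.Dict.getD_counter])]
    rw [PySem.List.foldl_add]
    ring
  rw [hA, hB]
  exact sum_counts_eq (bg s1) (bg s2)
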